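-- pv_equiv track=rewrite | github.com/huangruizhe/audio | examples/asr/librispeech_alignment/alignment/torchaudio_k2_aligner.py | find_unaligned_text
-- ===== SOURCE A (Python) =====
-- import itertools
--
-- def merge_segments(segments, threshold, is_sorted=True):
--     merged = []
--     if not is_sorted:
--         segments = sorted(segments, key=lambda x: x[0])
--     for start, end in segments:
--         if merged and start - merged[-1][1] <= threshold:
--             merged[-1][1] = max(merged[-1][1], end)
--         else:
--             merged.append([start, end])
--     return merged
--
-- def get_dur_group(group, rg_min, alignment_results):
--     ss = rg_min + group[0] - 1
--     ee = rg_min + group[-1] + 1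
--     return alignment_results[ee] - alignment_results[ss]
--
-- def find_unaligned_text(rg_min, rg_max, set_lis_results):
--     '''
--     The "unaligned" parts are defined as the "holes" of alignment results in the original transcript.
--     E.g., (s1, e2) is a hole if the words starting from s1 and ending at e1 in the original transcript do not appear in the alignment results.
--     Note, the holes are not necessarily "align-able", as it may not be spoken in the audio.
--     '''
--
--     # Find the indices of all consecutive "False" segments
--     holes = [[rg_min+i for i, _ in group] for key, group in itertools.groupby(enumerate(list(range(rg_min, rg_max+1))), key=lambda x: x[1] in set_lis_results) if not key]
--
--     if False:
--         # Too few words, e.g., 2 words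
--         no_need_to_realign1 = [group for group in to_realign if len(group) <= no_need_to_realign_thres1]
--         no_need_to_realign1 = [(rg_min + group[0] - 1, rg_min + group[-1] + 1) for group in no_need_to_realign1]
--         to_realign = [group for group in to_realign if len(group) > no_need_to_realign_thres1]
--
--         # Too short time, e.g., 10 frames in the final output is 0.4 sec
--         no_need_to_realign2 = [group for group in to_realign if get_dur_group(group, rg_min, alignment_results) <= no_need_to_realign_thres2]
--         no_need_to_realign2 = [(rg_min + group[0] - 1, rg_min + group[-1] + 1) for group in no_need_to_realign2]
--         to_realign = [group for group in to_realign if get_dur_group(group, rg_min, alignment_results) > no_need_to_realign_thres2]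
--
--         no_need_to_realign = no_need_to_realign1 + no_need_to_realign2
--         no_need_to_realign = sorted(no_need_to_realign, key=lambda x: x[0])
--     else:
--         # Ok, just add more padding to the segments
--         no_need_to_realign = []
--         pass
--
--     # Ok, these are the unaligned holes in the transcript, which may need to be realigned
--     holes = [(group[0], group[-1]) for group in holes]
--
--     # Merge the unaligned segments if they are close to each other
--     holes = merge_segments(holes, threshold=3, is_sorted=True)
--
--     # neighbor_range = 3  # add 3 already aligned words to the left and right
--     # to_realign = [
--     #     (
--     #         get_neighbor_aligned_word(rg_min + group[0], alignment_results, -neighbor_range),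
--     #         get_neighbor_aligned_word(rg_min + group[-1] + 1, alignment_results, neighbor_range)
--     #     ) for group in to_realign
--     # ]  # each start/end will be an aligned word
--
--     return holes
-- ===== SOURCE B (Python) =====
-- def find_unaligned_text(rg_min, rg_max, set_lis_results):
--     """Single linear scan: collect unaligned indices, merging gaps of <= 3 on the fly."""
--     aligned = set(set_lis_results)
--     merged = []
--     for i in range(rg_min, rg_max + 1):
--         if i in aligned:
--             continue
--         if merged and i - merged[-1][1] <= 3:
--             merged[-1][1] = i
--         else:
--             merged.append([i, i])
--     return merged
-- ===== Notes on version B (the rewrite author's own statement) =====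
-- stated objective: simpler
-- what changed: Replaced the groupby-over-enumerate run detection, (first,last) pair extraction and separate merge_segments pass (plus dead helpers) by one linear scan that builds the merged hole list directly.
import Mathlib
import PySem

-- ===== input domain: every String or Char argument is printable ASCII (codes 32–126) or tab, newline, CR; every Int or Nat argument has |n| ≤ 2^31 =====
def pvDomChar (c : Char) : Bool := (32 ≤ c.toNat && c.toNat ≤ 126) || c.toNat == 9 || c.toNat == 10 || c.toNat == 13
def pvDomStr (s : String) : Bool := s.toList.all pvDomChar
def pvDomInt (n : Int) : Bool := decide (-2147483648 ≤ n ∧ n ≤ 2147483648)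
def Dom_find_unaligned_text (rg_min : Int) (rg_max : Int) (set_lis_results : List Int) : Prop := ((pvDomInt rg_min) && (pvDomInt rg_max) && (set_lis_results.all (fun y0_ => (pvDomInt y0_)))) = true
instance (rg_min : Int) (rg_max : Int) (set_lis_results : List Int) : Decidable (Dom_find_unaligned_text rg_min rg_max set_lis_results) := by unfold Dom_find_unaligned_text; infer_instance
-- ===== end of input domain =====

-- B replaces A's groupby-run-detection + pair extraction + separate merge pass by one linear scan
-- that builds the merged hole list directly (objective: simpler).

-- ===== PORT A =====

-- merged[-1][1] in Python (the guard keeps merged nonempty and its entries are 2-lists,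
-- so the defaults are unreachable)
def pvLastEnd (m : List (List Int)) : Int :=
  PySem.List.pyGetD (PySem.List.pyGetD m (-1) []) 1 0

-- merged[-1][1] = v in Python: the last 2-list gets its second slot set to v
def pvSetLastEnd (m : List (List Int)) (v : Int) : List (List Int) :=
  m.dropLast ++ [PySem.List.pySetD (PySem.List.pyGetD m (-1) []) 1 v]

-- the 'for start, end in segments' loop of merge_segments
def pvMergeLoop (threshold : Int) (merged : List (List Int)) : List (Int × Int) → List (List Int)
  | [] => merged
  | se :: rest =>
      if merged ≠ [] ∧ se.1 - pvLastEnd merged ≤ threshold then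
        pvMergeLoop threshold (pvSetLastEnd merged (max (pvLastEnd merged) se.2)) rest
      else
        pvMergeLoop threshold (merged ++ [[se.1, se.2]]) rest

def merge_segments (segments : List (Int × Int)) (threshold : Int) (is_sorted : Bool) : List (List Int) :=
  let segments := if !is_sorted then PySem.List.sorted segments (fun x => x.1) false else segments
  pvMergeLoop threshold [] segments

-- enumerate(xs, start): hand-ported tail-recursively (accumulator + reverse) so large
-- inputs evaluate; exact: pvEnumerate s [] xs = list(enumerate(xs, s)) (proved below)
def pvEnumerate {α : Type} (s : Int) (acc : List (Int × α)) : List α → List (Int × α)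
  | [] => acc.reverse
  | x :: xs => pvEnumerate (s + 1) ((s, x) :: acc) xs

-- itertools.groupby(l, key): maximal runs of equal key, ported as the structural
-- right-recursion producing the same (key, group-list) list
def pvChunk {α : Type} (key : α → Bool) : List α → List (Bool × List α)
  | [] => []
  | x :: xs =>
      (key x, x :: xs.takeWhile (fun y => key y == key x)) ::
        pvChunk key (xs.dropWhile (fun y => key y == key x))
  termination_by l => l.length
  decreasing_by exact Nat.lt_succ_of_le (List.length_dropWhile_le _ _)

def find_unaligned_text (rg_min : Int) (rg_max : Int) (set_lis_results : List Int) : List (List Int) :=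
  let holes :=
    ((pvChunk (fun x => decide (x.2 ∈ set_lis_results))
        (pvEnumerate 0 [] (PySem.List.pyRange rg_min (rg_max + 1) 1))).filter
      (fun g => !g.1)).map (fun g => g.2.map (fun p => rg_min + p.1))
  -- groups from groupby are nonempty, so group[0]/group[-1] never raise; defaults unreachable
  let holes2 := holes.map (fun g => (PySem.List.pyGetD g 0 0, PySem.List.pyGetD g (-1) 0))
  merge_segments holes2 3 true

-- ===== PORT B =====
def find_unaligned_text_alt (rg_min : Int) (rg_max : Int) (set_lis_results : List Int) : List (List Int) :=
  let aligned : PySem.Set Int := PySem.Set.ofList set_lis_results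
  (PySem.List.pyRange rg_min (rg_max + 1) 1).foldl
    (fun merged i =>
      if i ∈ aligned then merged
      else if merged ≠ [] ∧ i - pvLastEnd merged ≤ 3 then pvSetLastEnd merged i
      else merged ++ [[i, i]])
    []

-- ===== PRECONDITION & SPEC =====
def Spec_find_unaligned_text (rg_min : Int) (rg_max : Int) (set_lis_results : List Int) (out : List (List Int)) : Prop := out = find_unaligned_text_alt rg_min rg_max set_lis_results
instance (rg_min : Int) (rg_max : Int) (set_lis_results : List Int) (out : List (List Int)) : Decidable (Spec_find_unaligned_text rg_min rg_max set_lis_results out) := by unfold Spec_find_unaligned_text; infer_instance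

-- ===== CLAIM (what is proved, stated in full; the proofs are below) =====
def Claim_equal_find_unaligned_text : Prop := ∀ (rg_min : Int) (rg_max : Int) (set_lis_results : List Int), Dom_find_unaligned_text rg_min rg_max set_lis_results → Spec_find_unaligned_text rg_min rg_max set_lis_results (find_unaligned_text rg_min rg_max set_lis_results)

-- ===== LEMMAS AND PROOFS =====

-- B's loop body, with membership abstracted to a Bool predicate
def pvStepB (p : Int → Bool) (m : List (List Int)) (i : Int) : List (List Int) :=
  if p i = true then m
  else if m ≠ [] ∧ i - pvLastEnd m ≤ 3 then pvSetLastEnd m i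
  else m ++ [[i, i]]

-- every accumulator entry is a 2-list [s, e]
def pvPairs (m : List (List Int)) : Prop := ∀ g ∈ m, ∃ s e : Int, g = [s, e]

theorem pvLastEnd_append_pair (m : List (List Int)) (s e : Int) :
    pvLastEnd (m ++ [[s, e]]) = e := by
  unfold pvLastEnd
  rw [PySem.List.pyGetD_neg_one_append_singleton]
  simp [pysem]

theorem pvSetLastEnd_append_pair (m : List (List Int)) (s e v : Int) :
    pvSetLastEnd (m ++ [[s, e]]) v = m ++ [[s, v]] := by
  unfold pvSetLastEnd
  rw [PySem.List.pyGetD_neg_one_append_singleton, List.dropLast_concat]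
  have h : PySem.List.pySetD [s, e] (1 : Int) v = [s, v] := by simp [pysem]
  rw [h]

theorem pvPairs_decomp {m : List (List Int)} (hne : m ≠ []) (hp : pvPairs m) :
    ∃ m₀ s e, m = m₀ ++ [[s, e]] ∧ pvPairs m₀ := by
  obtain ⟨s, e, hse⟩ := hp (m.getLast hne) (List.getLast_mem hne)
  exact ⟨m.dropLast, s, e, by rw [← hse]; exact (List.dropLast_append_getLast hne).symm,
    fun g hg => hp g (List.dropLast_subset _ hg)⟩

-- the tail-recursive enumerate is enumerate
theorem pvEnumerate_eq {α : Type} :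
    ∀ (xs : List α) (s : Int) (acc : List (Int × α)),
      pvEnumerate s acc xs = acc.reverse ++ PySem.List.enumerate xs s := by
  intro xs
  induction xs with
  | nil => intro s acc; simp [pvEnumerate]
  | cons x xs ih =>
    intro s acc
    rw [pvEnumerate, ih (s + 1) ((s, x) :: acc), PySem.List.enumerate_cons]
    simp

-- takeWhile/dropWhile characterisation of the first group
theorem pvChunk_nil {α : Type} (key : α → Bool) : pvChunk key [] = [] := by
  rw [pvChunk]

theorem pvChunk_cons_eq {α : Type} (key : α → Bool) (x : α) (xs : List α) :
    pvChunk key (x :: xs) =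
      (key x, x :: xs.takeWhile (fun y => key y == key x)) ::
        pvChunk key (xs.dropWhile (fun y => key y == key x)) := by
  rw [pvChunk]

-- groups produced by pvChunk consist of elements of the input list
theorem mem_of_mem_pvChunk {α : Type} (key : α → Bool) :
    ∀ (n : Nat) (l : List α), l.length ≤ n →
      ∀ (g : Bool × List α), g ∈ pvChunk key l → ∀ x ∈ g.2, x ∈ l := by
  intro n
  induction n with
  | zero =>
    intro l hl g hg
    have : l = [] := List.eq_nil_of_length_eq_zero (Nat.le_zero.mp hl)
    subst this
    simp [pvChunk] at hg
  | succ n ih =>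
    intro l hl g hg y hy
    cases l with
    | nil => simp [pvChunk] at hg
    | cons x xs =>
      rw [pvChunk_cons_eq] at hg
      rcases List.mem_cons.mp hg with h | h
      · subst h
        rcases List.mem_cons.mp hy with h | h
        · simp [h]
        · exact List.mem_cons_of_mem _ ((List.takeWhile_sublist _).subset h)
      · have hylt : y ∈ xs.dropWhile (fun y => key y == key x) :=
          ih _ (le_trans (List.length_dropWhile_le _ _) (by simpa using hl)) g h y hy
        exact List.mem_cons_of_mem _ ((List.dropWhile_sublist _).subset hylt)

-- pvChunk commutes with mapping, when the key reads only the mapped image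
theorem pvChunk_map {α β : Type} (key : β → Bool) (f : α → β) :
    ∀ (n : Nat) (l : List α), l.length ≤ n →
      (pvChunk (fun a => key (f a)) l).map (fun g => (g.1, g.2.map f)) = pvChunk key (l.map f) := by
  intro n
  induction n with
  | zero =>
    intro l hl
    have : l = [] := List.eq_nil_of_length_eq_zero (Nat.le_zero.mp hl)
    subst this
    simp [pvChunk]
  | succ n ih =>
    intro l hl
    cases l with
    | nil => simp [pvChunk]
    | cons x xs =>
      conv_rhs => rw [List.map_cons, pvChunk_cons_eq]
      rw [pvChunk_cons_eq]
      simp only [List.map_cons, List.takeWhile_map, List.dropWhile_map]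
      rw [← ih _ (le_trans (List.length_dropWhile_le _ _) (by simpa using hl))]
      simp [Function.comp_def]

theorem pvChain_getLast :
    ∀ (t : List Int) (x : Int), List.IsChain (fun a b => b = a + 1) (x :: t) →
      (x :: t).getLast (by simp) = x + t.length := by
  intro t
  induction t with
  | nil => simp
  | cons y t' ih =>
    intro x h
    have hy : y = x + 1 := h.rel_head
    have : (x :: y :: t').getLast (by simp) = (y :: t').getLast (by simp) := by
      simp [List.getLast]
    rw [this, ih y h.tail, hy]
    simp only [List.length_cons]
    push_cast
    ring

theorem pvChain_pyRange : ∀ (n : Nat) (a b : Int), (b - a).toNat = n →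
    List.IsChain (fun x y => y = x + 1) (PySem.List.pyRange a b 1) := by
  intro n
  induction n with
  | zero =>
    intro a b h
    rw [PySem.List.pyRange_one_eq_nil (by omega)]
    exact List.isChain_nil
  | succ n ih =>
    intro a b h
    by_cases hab : b ≤ a
    · rw [PySem.List.pyRange_one_eq_nil hab]; exact List.isChain_nil
    · rw [PySem.List.pyRange_one_cons (by omega)]
      refine (ih (a + 1) b (by omega)).cons ?_
      intro y hy
      by_cases h2 : a + 1 < b
      · rw [PySem.List.pyRange_one_cons h2] at hy
        simp at hy
        omega
      · rw [PySem.List.pyRange_one_eq_nil (by omega)] at hy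
        simp at hy

-- fold over a consecutive all-unaligned run keeps extending the last segment
theorem pvRunFold (p : Int → Bool) :
    ∀ (t : List Int) (m₀ : List (List Int)) (s z : Int),
      List.IsChain (fun a b => b = a + 1) (z :: t) → (∀ y ∈ t, p y = false) →
      t.foldl (pvStepB p) (m₀ ++ [[s, z]]) = m₀ ++ [[s, z + t.length]] := by
  intro t
  induction t with
  | nil => simp
  | cons y t' ih =>
    intro m₀ s z hch hp
    have hy : y = z + 1 := hch.rel_head
    have hstep : pvStepB p (m₀ ++ [[s, z]]) y = m₀ ++ [[s, y]] := by
      rw [pvStepB, if_neg (by simp [hp y (by simp)]),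
        if_pos ⟨by simp, by rw [pvLastEnd_append_pair]; omega⟩,
        pvSetLastEnd_append_pair]
    rw [List.foldl_cons, hstep, ih m₀ s y hch.tail (fun y hy => hp y (by simp [hy]))]
    have : y + (t'.length : Int) = z + ((y :: t').length : Nat) := by
      simp [hy]; ring
    rw [this]

theorem pvFoldSkip (p : Int → Bool) (t : List Int) (m : List (List Int))
    (h : ∀ y ∈ t, p y = true) : t.foldl (pvStepB p) m = m := by
  induction t generalizing m with
  | nil => rfl
  | cons y t' ih =>
    rw [List.foldl_cons, pvStepB, if_pos (h y (by simp))]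
    exact ih _ (fun y hy => h y (by simp [hy]))

-- MAIN: groupby + pair extraction + merge pass  =  B's single scan, from any well-formed state
theorem pvMain (p : Int → Bool) :
    ∀ (n : Nat) (V : List Int) (m : List (List Int)), V.length ≤ n →
      List.IsChain (fun x y => y = x + 1) V →
      pvPairs m →
      (m = [] ∨ ∀ v ∈ V, pvLastEnd m < v) →
      pvMergeLoop 3 m
          (((pvChunk p V).filter (fun g => !g.1)).map
            (fun g => (PySem.List.pyGetD g.2 0 0, PySem.List.pyGetD g.2 (-1) 0)))
        = V.foldl (pvStepB p) m := by
  intro n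
  induction n with
  | zero =>
    intro V m hlen _ _ _
    have hV : V = [] := List.eq_nil_of_length_eq_zero (Nat.le_zero.mp hlen)
    subst hV
    rw [pvChunk_nil]
    rfl
  | succ n ih =>
    intro V m hlen hch hp hinv
    cases V with
    | nil => rw [pvChunk_nil]; rfl
    | cons x xs =>
      rw [pvChunk_cons_eq]
      set t := xs.takeWhile (fun y => p y == p x) with ht
      set d := xs.dropWhile (fun y => p y == p x) with hd
      have hxs : t ++ d = xs := List.takeWhile_append_dropWhile
      have hVsplit : x :: xs = (x :: t) ++ d := by rw [← hxs]; rfl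
      have hlend : d.length ≤ n := by
        have h1 : xs.length ≤ n := by simpa using hlen
        exact le_trans (List.length_dropWhile_le _ _) h1
      have hlt : ∀ y ∈ t, p y = p x := by
        intro y hy
        exact eq_of_beq (by simpa using List.mem_takeWhile_imp hy)
      have hchain_r : List.IsChain (fun a b => b = a + 1) (x :: t) :=
        hch.prefix ⟨d, hVsplit.symm⟩
      have hchain_d : List.IsChain (fun a b => b = a + 1) d :=
        hch.suffix (by rw [hVsplit]; exact List.suffix_append _ _)
      have hpw : ∀ a ∈ x :: t, ∀ b ∈ d, a < b := by
        have h1 : List.Pairwise (· < ·) ((x :: t) ++ d) := by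
          rw [← hVsplit]
          exact List.isChain_iff_pairwise.mp (hch.imp (fun h => by omega))
        exact fun a ha b hb => (List.pairwise_append.mp h1).2.2 a ha b hb
      by_cases hpx : p x = true
      · -- first run is aligned: groupby drops it, B's scan skips it
        rw [hVsplit, List.foldl_append, List.foldl_cons, pvStepB, if_pos hpx,
          pvFoldSkip p t m (fun y hy => by rw [hlt y hy]; exact hpx)]
        have hfilter : List.filter (fun g => !g.1) ((p x, x :: t) :: pvChunk p d)
            = List.filter (fun g => !g.1) (pvChunk p d) := by simp [hpx]
        rw [hfilter]
        refine ih d m hlend hchain_d hp ?_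
        rcases hinv with h | h
        · exact Or.inl h
        · exact Or.inr fun v hv => h v (by rw [hVsplit]; exact List.mem_append_right _ hv)
      · -- first run is a hole
        have hpx' : p x = false := by simpa using hpx
        have hpt : ∀ y ∈ t, p y = false := fun y hy => by rw [hlt y hy]; exact hpx'
        have hfilter : List.filter (fun g => !g.1) ((p x, x :: t) :: pvChunk p d)
            = (p x, x :: t) :: List.filter (fun g => !g.1) (pvChunk p d) := by simp [hpx']
        rw [hfilter, List.map_cons]
        have hhead : PySem.List.pyGetD (x :: t) 0 0 = x := PySem.List.pyGetD_zero_cons ..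
        have hgetlast : (x :: t).getLast (by simp) = x + t.length := pvChain_getLast t x hchain_r
        have hlast : PySem.List.pyGetD (x :: t) (-1) 0 = x + t.length :=
          (PySem.List.pyGetD_neg_one (x :: t) 0 (by simp)).trans hgetlast
        have hLd : ∀ v ∈ d, x + (t.length : Int) < v := by
          intro v hv
          rw [← hgetlast]
          exact hpw _ (List.getLast_mem _) v hv
        rw [hVsplit, List.foldl_append, List.foldl_cons]
        simp only [hhead, hlast]
        by_cases hc : m ≠ [] ∧ x - pvLastEnd m ≤ 3
        · -- the hole merges into the last segment
          obtain ⟨m₀, s0, e0, hm, hp₀⟩ := pvPairs_decomp hc.1 hp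
          have he0 : pvLastEnd m = e0 := by rw [hm, pvLastEnd_append_pair]
          have he0x : e0 < x := by
            rcases hinv with h | h
            · exact absurd h hc.1
            · have := h x (by simp)
              omega
          have hstepA : pvMergeLoop 3 m ((x, x + (t.length : Int)) ::
                (List.filter (fun g => !g.1) (pvChunk p d)).map
                  (fun g => (PySem.List.pyGetD g.2 0 0, PySem.List.pyGetD g.2 (-1) 0)))
              = pvMergeLoop 3 (m₀ ++ [[s0, x + (t.length : Int)]])
                ((List.filter (fun g => !g.1) (pvChunk p d)).map
                  (fun g => (PySem.List.pyGetD g.2 0 0, PySem.List.pyGetD g.2 (-1) 0))) := by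
            rw [pvMergeLoop, if_pos ⟨hc.1, hc.2⟩]
            congr 1
            have hmax : max (pvLastEnd m) (x + (t.length : Int)) = x + (t.length : Int) := by
              rw [he0]
              have : (0 : Int) ≤ t.length := by positivity
              omega
            rw [hmax, hm, pvSetLastEnd_append_pair]
          have hstepB : pvStepB p m x = m₀ ++ [[s0, x]] := by
            rw [pvStepB, if_neg (by simp [hpx']), if_pos hc, hm, pvSetLastEnd_append_pair]
          rw [hstepA, hstepB, pvRunFold p t m₀ s0 x hchain_r hpt]
          refine ih d (m₀ ++ [[s0, x + (t.length : Int)]]) hlend hchain_d ?_ ?_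
          · intro g hg
            rcases List.mem_append.mp hg with h | h
            · exact hp₀ g h
            · exact ⟨s0, x + t.length, by simpa using h⟩
          · refine Or.inr fun v hv => ?_
            rw [pvLastEnd_append_pair]
            exact hLd v hv
        · -- the hole starts a new segment
          have hstepA : pvMergeLoop 3 m ((x, x + (t.length : Int)) ::
                (List.filter (fun g => !g.1) (pvChunk p d)).map
                  (fun g => (PySem.List.pyGetD g.2 0 0, PySem.List.pyGetD g.2 (-1) 0)))
              = pvMergeLoop 3 (m ++ [[x, x + (t.length : Int)]])
                ((List.filter (fun g => !g.1) (pvChunk p d)).map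
                  (fun g => (PySem.List.pyGetD g.2 0 0, PySem.List.pyGetD g.2 (-1) 0))) := by
            rw [pvMergeLoop, if_neg hc]
          have hstepB : pvStepB p m x = m ++ [[x, x]] := by
            rw [pvStepB, if_neg (by simp [hpx']), if_neg hc]
          rw [hstepA, hstepB, pvRunFold p t m x x hchain_r hpt]
          refine ih d (m ++ [[x, x + (t.length : Int)]]) hlend hchain_d ?_ ?_
          · intro g hg
            rcases List.mem_append.mp hg with h | h
            · exact hp g h
            · exact ⟨x, x + t.length, by simpa using h⟩
          · refine Or.inr fun v hv => ?_
            rw [pvLastEnd_append_pair]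
            exact hLd v hv

-- ===== VERDICT (by name: the statement is the Claim_ definition above) =====
theorem find_unaligned_text_spec : Claim_equal_find_unaligned_text := by
  intro a b s _
  show find_unaligned_text a b s = find_unaligned_text_alt a b s
  have hA : find_unaligned_text a b s = pvMergeLoop 3 []
      ((((pvChunk (fun x : Int × Int => decide (x.2 ∈ s))
          (pvEnumerate 0 [] (PySem.List.pyRange a (b + 1) 1))).filter (fun g => !g.1)).map
        (fun g => g.2.map (fun q => a + q.1))).map
        (fun g => (PySem.List.pyGetD g 0 0, PySem.List.pyGetD g (-1) 0))) := rfl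
  have hzip : pvEnumerate 0 [] (PySem.List.pyRange a (b + 1) 1)
      = PySem.List.enumerate (PySem.List.pyRange a (b + 1) 1) 0 := by
    rw [pvEnumerate_eq]
    rfl
  have hBdef : find_unaligned_text_alt a b s = (PySem.List.pyRange a (b + 1) 1).foldl
      (fun merged i =>
        if i ∈ PySem.Set.ofList s then merged
        else if merged ≠ [] ∧ i - pvLastEnd merged ≤ 3 then pvSetLastEnd merged i
        else merged ++ [[i, i]]) [] := rfl
  have hB : (PySem.List.pyRange a (b + 1) 1).foldl
      (fun merged i =>
        if i ∈ PySem.Set.ofList s then merged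
        else if merged ≠ [] ∧ i - pvLastEnd merged ≤ 3 then pvSetLastEnd merged i
        else merged ++ [[i, i]]) []
      = (PySem.List.pyRange a (b + 1) 1).foldl (pvStepB (fun i => decide (i ∈ s))) [] := by
    apply PySem.List.foldl_congr_mem
    intro acc y _
    by_cases hm : y ∈ s
    · simp [pvStepB, PySem.Set.mem_ofList, hm]
    · simp [pvStepB, PySem.Set.mem_ofList, hm]
  have hgrp : ∀ g ∈ (pvChunk (fun x : Int × Int => decide (x.2 ∈ s))
        (PySem.List.enumerate (PySem.List.pyRange a (b + 1) 1) 0)).filter (fun g => !g.1),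
      g.2.map (fun q => a + q.1) = g.2.map (fun q : Int × Int => q.2) := by
    intro g hg
    apply List.map_congr_left
    intro q hq
    have hqen : q ∈ PySem.List.enumerate (PySem.List.pyRange a (b + 1) 1) 0 :=
      mem_of_mem_pvChunk _ _ _ le_rfl g (List.mem_of_mem_filter hg) q hq
    obtain ⟨k, hk, hqe⟩ := (PySem.List.mem_enumerate_iff ..).mp hqen
    rw [hqe]
    simp [PySem.List.getElem_pyRange_one]
  have E1 : ((pvChunk (fun x : Int × Int => decide (x.2 ∈ s))
        (PySem.List.enumerate (PySem.List.pyRange a (b + 1) 1) 0)).filter (fun g => !g.1)).map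
        (fun g => g.2.map (fun q => a + q.1))
      = ((pvChunk (fun x : Int × Int => decide (x.2 ∈ s))
        (PySem.List.enumerate (PySem.List.pyRange a (b + 1) 1) 0)).filter (fun g => !g.1)).map
        (fun g => g.2.map (fun q : Int × Int => q.2)) := List.map_congr_left hgrp
  have E4 : ((pvChunk (fun x : Int × Int => decide (x.2 ∈ s))
        (PySem.List.enumerate (PySem.List.pyRange a (b + 1) 1) 0)).map
          (fun g => (g.1, g.2.map (fun q : Int × Int => q.2))))
      = pvChunk (fun i : Int => decide (i ∈ s))
          ((PySem.List.enumerate (PySem.List.pyRange a (b + 1) 1) 0).map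
            (fun q : Int × Int => q.2)) :=
    pvChunk_map (fun i : Int => decide (i ∈ s)) (fun q : Int × Int => q.2) _ _ le_rfl
  have h2 : ((pvChunk (fun x : Int × Int => decide (x.2 ∈ s))
        (PySem.List.enumerate (PySem.List.pyRange a (b + 1) 1) 0)).filter (fun g => !g.1)).map
          (fun g => (g.1, g.2.map (fun q : Int × Int => q.2)))
      = (((pvChunk (fun x : Int × Int => decide (x.2 ∈ s))
        (PySem.List.enumerate (PySem.List.pyRange a (b + 1) 1) 0)).map
          (fun g => (g.1, g.2.map (fun q : Int × Int => q.2)))).filter (fun g => !g.1)) := by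
    rw [List.filter_map]
    rfl
  have Echain : ((pvChunk (fun x : Int × Int => decide (x.2 ∈ s))
        (PySem.List.enumerate (PySem.List.pyRange a (b + 1) 1) 0)).filter (fun g => !g.1)).map
        (fun g => g.2.map (fun q : Int × Int => q.2))
      = ((pvChunk (fun i : Int => decide (i ∈ s))
          (PySem.List.pyRange a (b + 1) 1)).filter (fun g => !g.1)).map (fun g => g.2) := by
    calc ((pvChunk (fun x : Int × Int => decide (x.2 ∈ s))
            (PySem.List.enumerate (PySem.List.pyRange a (b + 1) 1) 0)).filter (fun g => !g.1)).map
            (fun g => g.2.map (fun q : Int × Int => q.2))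
        = (((pvChunk (fun x : Int × Int => decide (x.2 ∈ s))
            (PySem.List.enumerate (PySem.List.pyRange a (b + 1) 1) 0)).filter (fun g => !g.1)).map
            (fun g => (g.1, g.2.map (fun q : Int × Int => q.2)))).map (fun g => g.2) := by
          rw [List.map_map]
          rfl
      _ = ((pvChunk (fun i : Int => decide (i ∈ s))
            ((PySem.List.enumerate (PySem.List.pyRange a (b + 1) 1) 0).map
              (fun q : Int × Int => q.2))).filter (fun g => !g.1)).map (fun g => g.2) := by
          rw [h2, E4]
      _ = ((pvChunk (fun i : Int => decide (i ∈ s))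
            (PySem.List.pyRange a (b + 1) 1)).filter (fun g => !g.1)).map (fun g => g.2) := by
          rw [PySem.List.map_snd_enumerate]
  have hmain := pvMain (fun i => decide (i ∈ s)) (PySem.List.pyRange a (b + 1) 1).length
    (PySem.List.pyRange a (b + 1) 1) [] le_rfl (pvChain_pyRange _ a (b + 1) rfl)
    (fun g hg => absurd hg (by simp)) (Or.inl rfl)
  calc find_unaligned_text a b s
      = pvMergeLoop 3 []
          ((((pvChunk (fun x : Int × Int => decide (x.2 ∈ s))
              (PySem.List.enumerate (PySem.List.pyRange a (b + 1) 1) 0)).filter (fun g => !g.1)).map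
            (fun g => g.2.map (fun q => a + q.1))).map
            (fun g => (PySem.List.pyGetD g 0 0, PySem.List.pyGetD g (-1) 0))) := by
          rw [hA, hzip]
    _ = pvMergeLoop 3 []
          ((((pvChunk (fun i : Int => decide (i ∈ s))
              (PySem.List.pyRange a (b + 1) 1)).filter (fun g => !g.1)).map (fun g => g.2)).map
            (fun g => (PySem.List.pyGetD g 0 0, PySem.List.pyGetD g (-1) 0))) := by
          rw [E1, Echain]
    _ = (PySem.List.pyRange a (b + 1) 1).foldl (pvStepB (fun i => decide (i ∈ s))) [] := by
          rw [List.map_map]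
          exact hmain
    _ = find_unaligned_text_alt a b s := by rw [hBdef]; exact hB.symm
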